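-- pv_equiv track=rewrite | github.com/398494308/Quant-test-2 | src/research_v2/journal.py | _stage_round_labels
-- ===== SOURCE A (Python) =====
-- from typing import Any
--
-- def _entry_iteration(entry: dict[str, Any]) -> int:
--     try:
--         return int(entry.get("iteration", 0) or 0)
--     except (TypeError, ValueError):
--         return 0
--
-- def _stage_round_labels(entries: list[dict[str, Any]], start_index: int) -> list[str]:
--     numeric_labels = [_entry_iteration(entry) for entry in entries]
--     seen: set[int] = set()
--     previous = -1
--     duplicate_or_reset = False
--     for value in numeric_labels:
--         if value <= 0:
--             duplicate_or_reset = True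
--             continue
--         if value in seen or value <= previous:
--             duplicate_or_reset = True
--         seen.add(value)
--         previous = max(previous, value)
--
--     labels: list[str] = []
--     for offset, value in enumerate(numeric_labels, start=1):
--         if value <= 0:
--             labels.append(f"j{start_index + offset}")
--             continue
--         if duplicate_or_reset:
--             labels.append(f"s{offset}/r{value}")
--             continue
--         labels.append(str(value))
--     return labels
-- ===== SOURCE B (Python) =====
-- from typing import Any
--
-- def _entry_iteration(entry: dict[str, Any]) -> int:
--     try:
--         return int(entry.get("iteration", 0) or 0)
--     except (TypeError, ValueError):
--         return 0
--
-- def _stage_round_labels(entries: list[dict[str, Any]], start_index: int) -> list[str]: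
--     numeric_labels = [_entry_iteration(entry) for entry in entries]
--     # clean = the labels are exactly a strictly increasing positive sequence,
--     # detected by comparing against the sorted deduplicated labels.
--     clean = all(v > 0 for v in numeric_labels) and numeric_labels == sorted(set(numeric_labels))
--     if clean:
--         return [str(v) for v in numeric_labels]
--     return [
--         f"j{start_index + offset}" if value <= 0 else f"s{offset}/r{value}"
--         for offset, value in enumerate(numeric_labels, start=1)
--     ]
-- ===== Notes on version B (the rewrite author's own statement) =====
-- stated objective: alternative
-- what changed: The stateful seen-set/running-max detection scan is replaced by a sort-based normalization test (labels are clean iff all positive and equal to sorted(set(labels))), and the single three-branch labelling loop is split into two whole-list output modes chosen once.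
import Mathlib
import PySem

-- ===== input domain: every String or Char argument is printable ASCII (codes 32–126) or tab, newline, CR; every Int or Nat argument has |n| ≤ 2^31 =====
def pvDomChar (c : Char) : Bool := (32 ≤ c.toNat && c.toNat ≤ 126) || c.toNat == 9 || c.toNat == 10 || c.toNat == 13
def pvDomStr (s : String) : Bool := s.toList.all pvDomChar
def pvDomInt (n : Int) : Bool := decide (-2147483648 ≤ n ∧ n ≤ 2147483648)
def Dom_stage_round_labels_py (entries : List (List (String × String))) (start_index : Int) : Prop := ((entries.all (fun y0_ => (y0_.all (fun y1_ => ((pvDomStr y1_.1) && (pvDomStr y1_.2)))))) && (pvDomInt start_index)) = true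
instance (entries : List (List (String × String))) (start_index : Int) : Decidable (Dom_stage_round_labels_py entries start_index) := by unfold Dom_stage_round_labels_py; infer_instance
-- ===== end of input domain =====

-- B replaces A's stateful seen-set/running-max detection scan by a sort-based normalization
-- test (clean iff all labels positive and equal to sorted(set(labels))) and chooses between
-- two whole-list output modes instead of a per-element three-branch loop (alternative).

-- ===== PORT A =====
-- _entry_iteration: dict.get, 'or 0' (only "" is falsy here), int(s) with ValueError -> 0
def pvEntryIteration (entry : List (String × String)) : Int :=
  match (PySem.Dict.mk entry).get? "iteration" with
  | none => 0
  | some s =>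
      if s = "" then 0
      else match PySem.Int.ofStr? s with
           | some n => n
           | none => 0

-- the body of A's detection loop, state (seen, previous, duplicate_or_reset)
def pvAStep (st : PySem.Set Int × Int × Bool) (v : Int) : PySem.Set Int × Int × Bool :=
  let (seen, previous, dup) := st
  if v ≤ 0 then (seen, previous, true)
  else
    let dup := if PySem.Set.contains seen v || decide (v ≤ previous) then true else dup
    (PySem.Set.add seen v, max previous v, dup)

def stage_round_labels_py (entries : List (List (String × String))) (start_index : Int) : List String :=
  let numeric_labels := entries.map pvEntryIteration
  let st := numeric_labels.foldl pvAStep (PySem.Set.empty, -1, false)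
  let duplicate_or_reset := st.2.2
  (PySem.List.enumerate numeric_labels 1).foldl
    (fun labels ov =>
      if ov.2 ≤ 0 then labels ++ ["j" ++ PySem.Int.toStr (start_index + ov.1)]
      else if duplicate_or_reset then
        labels ++ ["s" ++ PySem.Int.toStr ov.1 ++ "/r" ++ PySem.Int.toStr ov.2]
      else labels ++ [PySem.Int.toStr ov.2]) []

-- ===== PORT B =====
def stage_round_labels_py_alt (entries : List (List (String × String))) (start_index : Int) : List String :=
  let numeric_labels := entries.map pvEntryIteration
  let clean := numeric_labels.all (fun v => decide (0 < v)) &&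
    decide (numeric_labels =
      PySem.List.sorted (PySem.Set.ofList numeric_labels) (fun x => x) false)
  if clean then numeric_labels.map PySem.Int.toStr
  else
    (PySem.List.enumerate numeric_labels 1).map
      (fun ov =>
        if ov.2 ≤ 0 then "j" ++ PySem.Int.toStr (start_index + ov.1)
        else "s" ++ PySem.Int.toStr ov.1 ++ "/r" ++ PySem.Int.toStr ov.2)

-- ===== PRECONDITION & SPEC =====
def Spec_stage_round_labels_py (entries : List (List (String × String))) (start_index : Int) (out : List String) : Prop := out = stage_round_labels_py_alt entries start_index
instance (entries : List (List (String × String))) (start_index : Int) (out : List String) : Decidable (Spec_stage_round_labels_py entries start_index out) := by unfold Spec_stage_round_labels_py; infer_instance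

-- ===== CLAIM =====
def Claim_equal_stage_round_labels_py : Prop := ∀ (entries : List (List (String × String))) (start_index : Int), Dom_stage_round_labels_py entries start_index → Spec_stage_round_labels_py entries start_index (stage_round_labels_py entries start_index)

-- ===== LEMMAS AND PROOFS =====

-- A's loop without the seen-set (legitimate because every member of seen is ≤ previous)
def pvFoldG (l : List Int) (p : Int) (d : Bool) : Bool :=
  match l with
  | [] => d
  | v :: t => if v ≤ 0 then pvFoldG t p true else pvFoldG t (max p v) (d || decide (v ≤ p))

-- "some element ≤ running max", threading the running max
def pvChainBad (p : Int) (l : List Int) : Bool :=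
  match l with
  | [] => false
  | v :: t => decide (v ≤ p) || pvChainBad (max p v) t

theorem pvA_eq_foldG (l : List Int) (seen : PySem.Set Int) (p : Int) (d : Bool)
    (h : ∀ x ∈ seen, x ≤ p) :
    (l.foldl pvAStep (seen, p, d)).2.2 = pvFoldG l p d := by
  induction l generalizing seen p d with
  | nil => rfl
  | cons v t ih =>
    by_cases hv : v ≤ 0
    · simp only [List.foldl_cons, pvAStep, pvFoldG, if_pos hv]
      exact ih _ _ _ h
    · have hmem : (PySem.Set.contains seen v || decide (v ≤ p)) = decide (v ≤ p) := by
        by_cases hc : v ∈ seen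
        · have hvp : v ≤ p := h v hc
          simp [PySem.Set.contains, hc, hvp]
        · simp [PySem.Set.contains, hc]
      have hinv : ∀ x ∈ PySem.Set.add seen v, x ≤ max p v := by
        intro x hx
        rcases (PySem.Set.mem_add seen v x).1 hx with hx | hx
        · exact le_trans (h x hx) (le_max_left _ _)
        · exact hx ▸ le_max_right _ _
      simp only [List.foldl_cons, pvAStep, pvFoldG, if_neg hv, hmem]
      rw [ih _ _ _ hinv]
      cases d <;> cases hdp : decide (v ≤ p) <;> simp

theorem pvFoldG_eq (l : List Int) (p : Int) (d : Bool) :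
    pvFoldG l p d = (d || l.any (fun v => decide (v ≤ 0)) || pvChainBad p (l.filter (fun v => decide (0 < v)))) := by
  induction l generalizing p d with
  | nil => simp [pvFoldG, pvChainBad]
  | cons v t ih =>
    by_cases hv : v ≤ 0
    · have hnp : ¬ (0 < v) := by omega
      simp only [pvFoldG, if_pos hv, ih, List.any_cons, List.filter_cons, hnp, decide_false,
        if_neg (by simp : ¬ (false = true))]
      simp [hv]
    · have hpos : 0 < v := by omega
      have hvz : decide (v ≤ 0) = false := by simp [hv]
      simp only [pvFoldG, if_neg hv, ih, List.filter_cons, List.any_cons, hpos, decide_true, hvz]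
      rw [if_pos trivial]
      rw [show pvChainBad p (v :: t.filter (fun v => decide (0 < v))) =
        (decide (v ≤ p) || pvChainBad (max p v) (t.filter (fun v => decide (0 < v)))) from rfl]
      generalize decide (v ≤ p) = A
      generalize t.any (fun v => decide (v ≤ 0)) = B
      generalize pvChainBad (max p v) (t.filter (fun v => decide (0 < v))) = C
      cases d <;> cases A <;> cases B <;> cases C <;> rfl

-- the running-max scan accepts exactly the strictly increasing lists starting above p
theorem pvChainBad_eq_false_iff (l : List Int) : ∀ p : Int,
    (pvChainBad p l = false ↔ (p :: l).Pairwise (· < ·)) := by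
  induction l with
  | nil => intro p; simp [pvChainBad]
  | cons v t ih =>
    intro p
    have key : (p :: v :: t).Pairwise (· < ·) ↔ p < v ∧ (v :: t).Pairwise (· < ·) := by
      constructor
      · intro h
        rw [List.pairwise_cons] at h
        exact ⟨h.1 v List.mem_cons_self, h.2⟩
      · rintro ⟨hpv, h⟩
        rw [List.pairwise_cons]
        refine ⟨?_, h⟩
        intro x hx
        rcases List.mem_cons.1 hx with rfl | hx
        · exact hpv
        · rw [List.pairwise_cons] at h
          exact lt_trans hpv (h.1 x hx)
    rw [key, show pvChainBad p (v :: t) = (decide (v ≤ p) || pvChainBad (max p v) t) from rfl]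
    by_cases hp : v ≤ p
    · simp only [hp, decide_true, Bool.true_or]
      constructor
      · intro h; exact absurd h (by simp)
      · rintro ⟨hpv, -⟩; omega
    · have hmax : max p v = v := by omega
      simp only [hp, decide_false, Bool.false_or, hmax, ih v]
      constructor
      · intro h; exact ⟨by omega, h⟩
      · rintro ⟨-, h⟩; exact h

-- a positive strictly increasing list is exactly one equal to sorted(set(of itself))
theorem pvPairwise_iff_sorted (l : List Int) (hpos : ∀ x ∈ l, 0 < x) :
    ((-1 : Int) :: l).Pairwise (· < ·) ↔
      l = PySem.List.sorted (PySem.Set.ofList l) (fun x => x) false := by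
  rw [List.pairwise_cons]
  constructor
  · rintro ⟨-, hpw⟩
    have hnd : l.Nodup := hpw.imp (fun h => ne_of_lt h)
    rw [PySem.Set.ofList_eq_self_of_nodup l hnd]
    exact (PySem.List.sorted_eq_of_perm_of_pairwise_lt l l (fun x => x) (List.Perm.refl l) hpw).symm
  · intro h
    have hpw : l.Pairwise (· < ·) := by
      rw [h]
      exact PySem.List.sorted_ofList_pairwise_lt l
    exact ⟨fun y hy => by have := hpos y hy; omega, hpw⟩

-- A's flag is the negation of B's cleanliness test
theorem pvFlag_eq (l : List Int) :
    (l.foldl pvAStep (PySem.Set.empty, -1, false)).2.2 =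
      !(l.all (fun v => decide (0 < v)) &&
        decide (l = PySem.List.sorted (PySem.Set.ofList l) (fun x => x) false)) := by
  rw [pvA_eq_foldG l PySem.Set.empty (-1) false (by intro x hx; simp [PySem.Set.empty] at hx)]
  rw [pvFoldG_eq]
  rcases hall : l.all (fun v => decide (0 < v)) with _ | _
  · simp only [List.all_eq_false, decide_eq_true_eq] at hall
    obtain ⟨a, ha, hna⟩ := hall
    have : l.any (fun v => decide (v ≤ 0)) = true := by
      simp only [List.any_eq_true, decide_eq_true_eq]
      exact ⟨a, ha, by omega⟩
    simp [this]
  · simp only [List.all_eq_true, decide_eq_true_eq] at hall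
    have hany : l.any (fun v => decide (v ≤ 0)) = false := by
      simp only [List.any_eq_false, decide_eq_true_eq]
      intro a ha; have := hall a ha; omega
    have hfilt : l.filter (fun v => decide (0 < v)) = l := by
      apply List.filter_eq_self.2
      intro a ha; simpa using hall a ha
    rw [hany, hfilt]
    simp only [Bool.false_or, Bool.true_and, Bool.false_or]
    rcases hcb : pvChainBad (-1) l with _ | _
    · have heq := (pvPairwise_iff_sorted l hall).1 ((pvChainBad_eq_false_iff l (-1)).1 hcb)
      simp only [decide_eq_true heq, Bool.not_true]
    · have hne : l ≠ PySem.List.sorted (PySem.Set.ofList l) (fun x => x) false := by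
        intro he
        have := (pvChainBad_eq_false_iff l (-1)).2 ((pvPairwise_iff_sorted l hall).2 he)
        rw [hcb] at this
        exact absurd this (by simp)
      simp [hne]

-- ===== VERDICT =====
theorem stage_round_labels_py_spec : Claim_equal_stage_round_labels_py := by
  intro entries start_index _
  unfold Spec_stage_round_labels_py stage_round_labels_py stage_round_labels_py_alt
  dsimp only
  rw [pvFlag_eq]
  set nums := entries.map pvEntryIteration with hnums
  set b := (nums.all (fun v => decide (0 < v)) &&
      decide (nums = PySem.List.sorted (PySem.Set.ofList nums) (fun x => x) false)) with hb
  rw [show (fun (labels : List String) (ov : Int × Int) =>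
      if ov.2 ≤ 0 then labels ++ ["j" ++ PySem.Int.toStr (start_index + ov.1)]
      else if (!b) = true then
        labels ++ ["s" ++ PySem.Int.toStr ov.1 ++ "/r" ++ PySem.Int.toStr ov.2]
      else labels ++ [PySem.Int.toStr ov.2]) =
      (fun (labels : List String) (ov : Int × Int) => labels ++
        [if ov.2 ≤ 0 then "j" ++ PySem.Int.toStr (start_index + ov.1)
         else if (!b) = true then
           "s" ++ PySem.Int.toStr ov.1 ++ "/r" ++ PySem.Int.toStr ov.2
         else PySem.Int.toStr ov.2]) from by funext labels ov; split_ifs <;> rfl]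
  rw [PySem.List.foldl_append_singleton_eq_map, List.nil_append]
  cases hb2 : b with
  | false =>
    simp only [Bool.not_false, Bool.false_eq_true, if_false]
    apply List.map_congr_left
    intro ov hov
    split_ifs <;> rfl
  | true =>
    have h := hb2
    rw [hb] at h
    simp only [Bool.and_eq_true, List.all_eq_true, decide_eq_true_eq] at h
    have hall : ∀ x ∈ nums, 0 < x := fun x hx => h.1 x hx
    simp only [Bool.not_true, Bool.false_eq_true, if_false]
    trans ((PySem.List.enumerate nums 1).map (fun ov => PySem.Int.toStr ov.2))
    · apply List.map_congr_left
      intro ov hov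
      obtain ⟨k, hk, hove⟩ := (PySem.List.mem_enumerate_iff _ _ _).1 hov
      have hx : 0 < ov.2 := by
        subst hove
        exact hall _ (List.getElem_mem hk)
      rw [if_neg (by omega)]
    · rw [show (fun ov : Int × Int => PySem.Int.toStr ov.2) =
          (PySem.Int.toStr ∘ (fun ov : Int × Int => ov.2)) from rfl,
        ← List.map_map, PySem.List.map_snd_enumerate, if_pos trivial]
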